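-- pv_equiv track=rewrite | github.com/xJoskiy/Discrete-Math-2021 | natural.py | DIV_NN_Dk
-- ===== SOURCE A (Python) =====
-- def COM_NN_D(x, y):
--     # Аносов Павел
--     # Сравнение двух чисел
--     if len(x) > len(y):  # Если первый список длиннее второго, то он число больше
--         return 2
--     elif len(x) < len(y):  # И наоборот
--         return 1
--     else:
--         for i, k in zip(x, y):
--             if i > k:  # Если цифра в большем разряде первого числа больше цифры во втором
--                 return 2  # То оно больше
--             elif i < k:
--                 return 1
--     return 0
--
-- def MUL_Nk_N(k, list0):
--     # Пекло Елизавета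
--     # Умножение натурального целого на 10^k
--     list1 = [0] * k
--     list0.extend(list1)
--     return list0
--
-- def DIV_NN_Dk(N1, N2):
--     # Гурьянов Савелий
--     # Целочисленное деление натуральных чисел осуществляется при помощи функции MUL_Nk_N
--     # Переменная k, ответственная за целую часть от деления, изначально равная 0, инкрементируется,
--     # пока N1 больше произведения k на N2
--     if COM_NN_D(N1, N2) != 1:
--         k = 1
--         while COM_NN_D(N1, MUL_Nk_N(k, N2.copy())) == 2:
--             k += 1
--         return k - 1
--     else:
--         return DIV_NN_Dk(N2, N1)
-- ===== SOURCE B (Python) =====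
-- def _less(a, b):
--     if len(a) != len(b):
--         return len(a) < len(b)
--     return a < b
--
-- def DIV_NN_Dk(N1, N2):
--     if _less(N1, N2):
--         N1, N2 = N2, N1
--     d = len(N1) - len(N2)
--     if d == 0:
--         return 0
--     pad = N2 + [0] * d
--     for x, y in zip(N1, pad):
--         if x != y:
--             return d if x > y else d - 1
--     return d - 1
-- ===== Notes on version B (the rewrite author's own statement) =====
-- stated objective: alternative
-- what changed: B replaces A's loop that rebuilds and compares N2 padded with k zeros for every k=1,2,... (and A's swap recursion) by a closed form: one ordering comparison with a possible swap, k = the length difference d, and a single comparison of N1 against N2 padded with d zeros to decide between d and d-1; this removes the repeated padded comparisons (O((L1-L2)*L1) worst case vs O(L1)), though on inputs of similar lengths both are linear.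
import Mathlib
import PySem

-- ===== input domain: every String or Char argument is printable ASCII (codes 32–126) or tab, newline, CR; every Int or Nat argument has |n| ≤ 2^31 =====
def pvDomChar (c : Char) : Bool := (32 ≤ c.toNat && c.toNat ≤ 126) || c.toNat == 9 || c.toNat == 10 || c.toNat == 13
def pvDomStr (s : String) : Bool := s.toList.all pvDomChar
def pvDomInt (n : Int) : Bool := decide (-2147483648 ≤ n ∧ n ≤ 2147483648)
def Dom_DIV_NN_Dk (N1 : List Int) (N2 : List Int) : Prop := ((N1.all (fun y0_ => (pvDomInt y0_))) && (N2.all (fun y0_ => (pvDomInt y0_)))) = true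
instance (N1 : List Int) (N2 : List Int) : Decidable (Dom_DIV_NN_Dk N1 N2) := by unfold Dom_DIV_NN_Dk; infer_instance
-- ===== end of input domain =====

-- B replaces A's trial loop (which rebuilds and compares N2 padded with k zeros for
-- every k = 1, 2, …) by a closed form: a swap-to-order comparison, k = the length
-- difference d, and ONE comparison of N1 against N2 padded with d zeros; equivalence
-- is proved on all inputs (A is total).

-- ===== PORT A =====

-- the 'for i, k in zip(x, y)' loop of COM_NN_D
def comZipA : List (Int × Int) → Int
  | [] => 0
  | (i, k) :: rest => if i > k then 2 else if i < k then 1 else comZipA rest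

-- COM_NN_D
def comA (x y : List Int) : Int :=
  if x.length > y.length then 2
  else if x.length < y.length then 1
  else comZipA (x.zip y)

-- MUL_Nk_N (on a copy of the list, as A calls it)
def mulA (k : Nat) (l : List Int) : List Int := l ++ List.replicate k 0

-- termination helper for A's while loop, cited by `decreasing_by`
theorem comA_two_le (x z : List Int) (h : comA x z = 2) : z.length ≤ x.length := by
  unfold comA at h; split_ifs at h with h1 h2 <;> omega

-- the 'while COM_NN_D(N1, MUL_Nk_N(k, N2.copy())) == 2: k += 1' loop
def loopA (N1 N2 : List Int) (k : Nat) : Int :=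
  if h : comA N1 (mulA k N2) = 2 then loopA N1 N2 (k + 1) else (k : Int) - 1
termination_by N1.length + 1 - k
decreasing_by
  have := comA_two_le _ _ h
  simp [mulA] at this
  omega

-- antisymmetry helpers, cited by DIV_NN_Dk's `decreasing_by`
theorem comZipA_swap (x : List Int) : ∀ (y : List Int),
    comZipA (x.zip y) = 1 → comZipA (y.zip x) = 2 := by
  induction x with
  | nil => intro y h; simp [comZipA] at h
  | cons a xs ih =>
    intro y h
    cases y with
    | nil => simp [comZipA] at h
    | cons b ys =>
      simp only [List.zip_cons_cons, comZipA] at h ⊢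
      split_ifs at h ⊢ with h1 h2 h3 <;> first | rfl | omega | exact ih ys h

theorem comA_antisym (x y : List Int) (h : comA x y = 1) : comA y x ≠ 1 := by
  unfold comA at h ⊢
  split_ifs at h ⊢ with h1 h2 h3 <;> try omega
  have := comZipA_swap x y h
  omega

-- DIV_NN_Dk
def DIV_NN_Dk (N1 : List Int) (N2 : List Int) : Int :=
  if h : comA N1 N2 ≠ 1 then loopA N1 N2 1 else DIV_NN_Dk N2 N1
termination_by (if comA N1 N2 = 1 then 1 else 0 : Nat)
decreasing_by
  simp only [ne_eq, not_not] at h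
  have h2 := comA_antisym _ _ h
  simp [h, h2]

-- ===== PORT B =====

-- Python's `a < b` on equal-length lists (elementwise lexicographic)
def lexLt : List Int → List Int → Bool
  | [], [] => false
  | [], _ :: _ => true
  | _ :: _, [] => false
  | x :: xs, y :: ys => if x < y then true else if x > y then false else lexLt xs ys

-- _less
def lessB (a b : List Int) : Bool :=
  if a.length ≠ b.length then decide (a.length < b.length) else lexLt a b

-- the 'for x, y in zip(N1, pad)' loop
def scanB (d : Int) : List (Int × Int) → Int
  | [] => d - 1
  | (x, y) :: rest => if x ≠ y then (if x > y then d else d - 1) else scanB d rest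

-- body after the swap
def mainB (N1 N2 : List Int) : Int :=
  if (N1.length : Int) - (N2.length : Int) = 0 then 0
  else scanB ((N1.length : Int) - (N2.length : Int))
    (N1.zip (N2 ++ List.replicate (N1.length - N2.length) 0))

def DIV_NN_Dk_alt (N1 : List Int) (N2 : List Int) : Int :=
  if lessB N1 N2 then mainB N2 N1 else mainB N1 N2

-- ===== PRECONDITION & SPEC =====
def Spec_DIV_NN_Dk (N1 : List Int) (N2 : List Int) (out : Int) : Prop := out = DIV_NN_Dk_alt N1 N2
instance (N1 : List Int) (N2 : List Int) (out : Int) : Decidable (Spec_DIV_NN_Dk N1 N2 out) := by unfold Spec_DIV_NN_Dk; infer_instance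

-- ===== CLAIM (what is proved, stated in full; the proofs are below) =====
def Claim_equal_DIV_NN_Dk : Prop := ∀ (N1 : List Int) (N2 : List Int), Dom_DIV_NN_Dk N1 N2 → Spec_DIV_NN_Dk N1 N2 (DIV_NN_Dk N1 N2)

-- ===== LEMMAS AND PROOFS =====

-- scanB is comZipA with its three results relabelled d / d-1 / d-1
theorem scanB_eq (d : Int) (zs : List (Int × Int)) :
    scanB d zs = if comZipA zs = 2 then d else d - 1 := by
  induction zs with
  | nil => simp [scanB, comZipA]
  | cons p rest ih =>
    obtain ⟨x, y⟩ := p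
    simp only [scanB, comZipA]
    split_ifs <;> first | rfl | omega

-- lexLt on equal-length lists is comZipA = 1
theorem lexLt_iff (x : List Int) : ∀ (y : List Int), x.length = y.length →
    (lexLt x y = true ↔ comZipA (x.zip y) = 1) := by
  induction x with
  | nil => intro y hy; cases y with
    | nil => simp [lexLt, comZipA]
    | cons b ys => simp at hy
  | cons a xs ih =>
    intro y hy
    cases y with
    | nil => simp at hy
    | cons b ys =>
      simp only [List.length_cons] at hy
      simp only [lexLt, List.zip_cons_cons, comZipA]
      rcases lt_trichotomy a b with h | h | h
      · rw [if_pos h, if_neg (by omega), if_pos h]; simp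
      · rw [if_neg (by omega), if_neg (by omega), if_neg (by omega), if_neg (by omega)]
        exact ih ys (by omega)
      · rw [if_neg (by omega), if_pos h, if_pos h]; simp

theorem lessB_iff (x y : List Int) : lessB x y = true ↔ comA x y = 1 := by
  unfold lessB comA
  split_ifs with h1 h2 h3 <;> simp_all <;> first | omega | exact lexLt_iff x y (by omega)

-- A's while loop, run from any 1 ≤ k ≤ d := len N1 - len N2, returns d or d-1
-- according to the lexicographic comparison of N1 with N2 padded to length d
theorem loopA_run (N1 N2 : List Int) : ∀ (m k : Nat), 1 ≤ k →
    k + N2.length ≤ N1.length → N1.length - N2.length - k = m →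
    loopA N1 N2 k =
      if comZipA (N1.zip (N2 ++ List.replicate (N1.length - N2.length) 0)) = 2
      then ((N1.length - N2.length : Nat) : Int)
      else ((N1.length - N2.length : Nat) : Int) - 1 := by
  intro m
  induction m with
  | zero =>
    intro k hk1 hk2 hm
    have hkd : k = N1.length - N2.length := by omega
    have hlen : N1.length = (mulA k N2).length := by simp [mulA]; omega
    rw [loopA]
    have hc : comA N1 (mulA k N2) = comZipA (N1.zip (mulA k N2)) := by
      unfold comA; rw [if_neg (by omega), if_neg (by omega)]
    by_cases h2 : comZipA (N1.zip (mulA k N2)) = 2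
    · rw [dif_pos (by rw [hc]; exact h2)]
      rw [loopA]
      have : ¬ comA N1 (mulA (k + 1) N2) = 2 := by
        unfold comA; rw [if_neg (by simp [mulA]; omega)]
        rw [if_pos (by simp [mulA]; omega)]; omega
      rw [dif_neg this]
      rw [if_pos (by rw [← hkd]; exact h2)]
      omega
    · rw [dif_neg (by rw [hc]; exact h2)]
      rw [if_neg (by rw [← hkd]; exact h2)]
      omega
  | succ n ih =>
    intro k hk1 hk2 hm
    rw [loopA]
    have : comA N1 (mulA k N2) = 2 := by
      unfold comA; rw [if_pos (by simp [mulA]; omega)]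
    rw [dif_pos this]
    exact ih (k + 1) (by omega) (by omega) (by omega)

-- the non-swapped branch: A's loop from k = 1 equals B's main body
theorem loop_eq_mainB (N1 N2 : List Int) (h : comA N1 N2 ≠ 1) :
    loopA N1 N2 1 = mainB N1 N2 := by
  have hlen : N2.length ≤ N1.length := by
    unfold comA at h; by_contra hc; rw [if_neg (by omega), if_pos (by omega)] at h; omega
  by_cases heq : N1.length = N2.length
  · -- d = 0: one loop test fails immediately, both sides return 0
    rw [loopA]
    have : ¬ comA N1 (mulA 1 N2) = 2 := by
      unfold comA; rw [if_neg (by simp [mulA]; omega), if_pos (by simp [mulA]; omega)]; omega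
    rw [dif_neg this]
    unfold mainB
    rw [if_pos (by omega)]
    norm_num
  · -- d ≥ 1: run the loop
    have hd : 1 + N2.length ≤ N1.length := by omega
    have hR : mainB N1 N2 =
        if comZipA (N1.zip (N2 ++ List.replicate (N1.length - N2.length) 0)) = 2
        then (N1.length : Int) - (N2.length : Int)
        else (N1.length : Int) - (N2.length : Int) - 1 := by
      unfold mainB
      rw [if_neg (by omega), scanB_eq]
    rw [loopA_run N1 N2 (N1.length - N2.length - 1) 1 (by omega) hd rfl, hR]
    split_ifs <;> omega

theorem div_eq (N1 N2 : List Int) : DIV_NN_Dk N1 N2 = DIV_NN_Dk_alt N1 N2 := by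
  by_cases h : comA N1 N2 = 1
  · have hswap := comA_antisym _ _ h
    rw [DIV_NN_Dk]
    rw [dif_neg (by simp [h])]
    rw [DIV_NN_Dk]
    rw [dif_pos hswap]
    unfold DIV_NN_Dk_alt
    rw [if_pos ((lessB_iff N1 N2).mpr h)]
    exact loop_eq_mainB N2 N1 hswap
  · rw [DIV_NN_Dk]
    rw [dif_pos h]
    unfold DIV_NN_Dk_alt
    have : lessB N1 N2 = false := by
      by_contra hc
      exact h ((lessB_iff N1 N2).mp (by revert hc; cases lessB N1 N2 <;> simp))
    rw [this]
    simp only [Bool.false_eq_true, if_false]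
    exact loop_eq_mainB N1 N2 h

-- ===== VERDICT (by name: the statement is the Claim_ definition above) =====
theorem DIV_NN_Dk_spec : Claim_equal_DIV_NN_Dk := by
  intro N1 N2 _
  unfold Spec_DIV_NN_Dk
  exact div_eq N1 N2
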